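-- pv_equiv track=rewrite | github.com/whuchenrui/experiment_data | application/raw_data/FilterRule.py | get_sub_seq_cnt
-- ===== SOURCE A (Python) =====
-- def get_sub_seq_cnt(line, value, length):
--     c_len = 0               # 当前最长1序列长度
--     max_len = 0             # 最大1序列长度
--     for i in range(0, length):
--         if line[i] >= value:
--             if c_len > 0:
--                 c_len += 1
--             else:
--                 c_len = 1
--         else:
--             if c_len > max_len:
--                 max_len = c_len
--             c_len = 0
--     if c_len > max_len:    # 处理最后一个数字为1的情况
--         max_len = c_len
--     return max_len
-- ===== SOURCE B (Python) =====
-- def get_sub_seq_cnt(line, value, length):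
--     n = max(length, 0)
--     cuts = [-1] + [i for i in range(length) if line[i] < value] + [n]
--     return max((b - a - 1 for a, b in zip(cuts, cuts[1:])), default=0)
-- ===== Notes on version B (the rewrite author's own statement) =====
-- stated objective: alternative
-- what changed: Replaces A's running counter with flush-on-failure and a final end-of-loop flush by a partition formulation: collect the cut indices where line[i] < value, pad them with sentinels -1 and n, and return the maximum adjacent gap minus one.
import Mathlib
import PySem

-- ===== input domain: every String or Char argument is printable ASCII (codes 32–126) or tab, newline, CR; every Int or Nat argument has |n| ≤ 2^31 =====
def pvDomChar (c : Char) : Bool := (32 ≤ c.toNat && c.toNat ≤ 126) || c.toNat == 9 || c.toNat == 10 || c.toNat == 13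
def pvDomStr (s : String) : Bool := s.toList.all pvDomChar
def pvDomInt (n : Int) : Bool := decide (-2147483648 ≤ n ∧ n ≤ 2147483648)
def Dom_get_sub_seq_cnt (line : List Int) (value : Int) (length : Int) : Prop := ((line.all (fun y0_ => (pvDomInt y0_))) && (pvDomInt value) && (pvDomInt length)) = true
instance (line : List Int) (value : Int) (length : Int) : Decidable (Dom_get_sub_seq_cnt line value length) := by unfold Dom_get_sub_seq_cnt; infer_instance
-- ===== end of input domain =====

-- B replaces A's running counter + end-of-loop flush by a cut-position formulation:
-- collect the indices where line[i] < value, pad with sentinels -1 and n, and return the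
-- maximum adjacent gap minus one (objective: alternative, same O(n) cost).

-- ===== PORT A =====
def get_sub_seq_cnt (line : List Int) (value : Int) (length : Int) : Int :=
  let st := (PySem.List.pyRange 0 length 1).foldl
    (fun (s : Int × Int) i =>
      if PySem.List.pyGetD line i 0 ≥ value then
        (if s.1 > 0 then s.1 + 1 else 1, s.2)
      else
        (0, if s.1 > s.2 then s.1 else s.2))
    (0, 0)
  if st.1 > st.2 then st.1 else st.2

-- ===== PORT B =====
def get_sub_seq_cnt_alt (line : List Int) (value : Int) (length : Int) : Int :=
  let n : Int := max length 0
  let cuts : List Int :=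
    [-1] ++ (PySem.List.pyRange 0 length 1).filter (fun i => PySem.List.pyGetD line i 0 < value) ++ [n]
  PySem.List.maxD ((cuts.zip cuts.tail).map (fun p => p.2 - p.1 - 1)) (fun y => y) 0

-- ===== PRECONDITION & SPEC =====
-- Pre_ excludes exactly the inputs where Python A raises IndexError (length > len(line));
-- Python B raises there too.
def Pre_get_sub_seq_cnt (line : List Int) (value : Int) (length : Int) : Prop :=
  length ≤ PySem.List.len line
instance (line : List Int) (value : Int) (length : Int) : Decidable (Pre_get_sub_seq_cnt line value length) := by unfold Pre_get_sub_seq_cnt; infer_instance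

def pvWitness_get_sub_seq_cnt : List Int × Int × Int := ([1, 3, 2, 0, 2], 2, 5)

def Spec_get_sub_seq_cnt (line : List Int) (value : Int) (length : Int) (out : Int) : Prop := out = get_sub_seq_cnt_alt line value length
instance (line : List Int) (value : Int) (length : Int) (out : Int) : Decidable (Spec_get_sub_seq_cnt line value length out) := by unfold Spec_get_sub_seq_cnt; infer_instance

-- ===== CLAIM (what is proved, stated in full; the proofs are below) =====
def Claim_equal_get_sub_seq_cnt : Prop := ∀ (line : List Int) (value : Int) (length : Int), Dom_get_sub_seq_cnt line value length → Pre_get_sub_seq_cnt line value length → Spec_get_sub_seq_cnt line value length (get_sub_seq_cnt line value length)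

-- ===== LEMMAS AND PROOFS =====

-- A's loop body, abstracted over the per-index predicate.
def pvStep (p : Int → Bool) (s : Int × Int) (i : Int) : Int × Int :=
  if p i then (if s.1 > 0 then s.1 + 1 else 1, s.2)
  else (0, if s.1 > s.2 then s.1 else s.2)

-- last element of a cut list, -1 if empty (the left sentinel).
def pvLast : List Int → Int
  | [] => -1
  | [a] => a
  | _ :: b :: t => pvLast (b :: t)

-- adjacent gaps minus one (recursive form of B's zip/map expression).
def pvGaps : List Int → List Int
  | a :: b :: t => (b - a - 1) :: pvGaps (b :: t)
  | _ => []

def pvMax (xs : List Int) : Int := PySem.List.maxD xs (fun y => y) 0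

lemma pvGaps_eq_zip (K : List Int) :
    (K.zip K.tail).map (fun p => p.2 - p.1 - 1) = pvGaps K := by
  match K with
  | [] => rfl
  | [a] => rfl
  | a :: b :: t =>
    simp only [List.tail_cons, List.zip_cons_cons, List.map_cons, pvGaps]
    exact congrArg _ (pvGaps_eq_zip (b :: t))

lemma pvLast_append_singleton (J : List Int) (x : Int) : pvLast (J ++ [x]) = x := by
  induction J with
  | nil => rfl
  | cons a t ih =>
    cases t with
    | nil => rfl
    | cons b u => simpa [pvLast] using ih

lemma pvLast_neg_one_cons (J : List Int) : pvLast (-1 :: J) = pvLast J := by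
  cases J with
  | nil => rfl
  | cons b u => rfl

lemma pvLast_lt (J : List Int) (n : Int) (h0 : -1 < n) (h : ∀ x ∈ J, x < n) : pvLast J < n := by
  induction J with
  | nil => simpa [pvLast] using h0
  | cons a t ih =>
    cases t with
    | nil => exact h a (by simp)
    | cons b u =>
      simp only [pvLast]
      exact ih (fun x hx => h x (List.mem_cons_of_mem _ hx))

lemma pvGaps_append (a : Int) (J : List Int) (x : Int) :
    pvGaps ((a :: J) ++ [x]) = pvGaps (a :: J) ++ [x - pvLast (a :: J) - 1] := by
  induction J generalizing a with
  | nil => rfl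
  | cons b t ih => simpa [pvGaps, pvLast_neg_one_cons] using ih b

lemma pvMax_append_singleton (xs : List Int) (x : Int) (hx : 0 ≤ x) :
    pvMax (xs ++ [x]) = max (pvMax xs) x := by
  unfold pvMax PySem.List.maxD PySem.List.max?
  rw [List.foldl_append]
  generalize List.foldl _ none xs = r
  cases r with
  | none => simp [max_def]; omega
  | some m => simp only [List.foldl_cons, List.foldl_nil, Option.getD_some]; split <;> simp [max_def] <;> omega

lemma pvInv (p : Int → Bool) (n : Nat) :
    (PySem.List.pyRange 0 (n : Int) 1).foldl (pvStep p) (0, 0)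
      = ((n : Int) - 1 - pvLast ((PySem.List.pyRange 0 (n : Int) 1).filter (fun i => !p i)),
         pvMax (pvGaps (-1 :: (PySem.List.pyRange 0 (n : Int) 1).filter (fun i => !p i)))) := by
  induction n with
  | zero =>
    simp [PySem.List.pyRange_one_eq_nil (by omega : (0:Int) ≤ 0), pvLast, pvGaps, pvMax,
      PySem.List.maxD, PySem.List.max?]
  | succ k ih =>
    have hsplit : PySem.List.pyRange 0 ((k + 1 : Nat) : Int) 1
        = PySem.List.pyRange 0 (k : Int) 1 ++ [(k : Int)] := by
      push_cast
      exact PySem.List.pyRange_one_succ_right (by exact_mod_cast Int.natCast_nonneg k)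
    have hmem : ∀ x ∈ (PySem.List.pyRange 0 (k : Int) 1).filter (fun i => !p i), x < (k : Int) := by
      intro x hx
      exact ((PySem.List.mem_pyRange_one).1 (List.mem_of_mem_filter hx)).2
    have hlast : pvLast ((PySem.List.pyRange 0 (k : Int) 1).filter (fun i => !p i)) < (k : Int) :=
      pvLast_lt _ _ (by omega) hmem
    rw [hsplit, List.foldl_append, List.filter_append, ih]
    by_cases hp : p (k : Int)
    · simp only [List.filter_cons, List.filter_nil, hp, Bool.not_true, Bool.false_eq_true,
        if_false, List.append_nil, List.foldl_cons, List.foldl_nil, pvStep, if_true]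
      push_cast
      simp only [Prod.mk.injEq]
      exact ⟨by split <;> omega, trivial⟩
    · simp only [List.filter_cons, List.filter_nil, hp, Bool.not_false, if_true, List.foldl_cons,
        List.foldl_nil, pvStep, Bool.false_eq_true, if_false]
      rw [pvLast_append_singleton]
      have hg : pvGaps (-1 :: ((PySem.List.pyRange 0 (k:Int) 1).filter (fun i => !p i) ++ [(k:Int)]))
          = pvGaps (-1 :: (PySem.List.pyRange 0 (k:Int) 1).filter (fun i => !p i))
            ++ [(k:Int) - pvLast ((PySem.List.pyRange 0 (k:Int) 1).filter (fun i => !p i)) - 1] := by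
      
        simpa [pvLast_neg_one_cons] using
          pvGaps_append (-1) ((PySem.List.pyRange 0 (k:Int) 1).filter (fun i => !p i)) (k:Int)
      rw [hg, pvMax_append_singleton _ _ (by omega)]
      push_cast
      simp only [Prod.mk.injEq]
      refine ⟨by omega, ?_⟩
      rw [max_def]; split <;> split <;> omega

-- ===== VERDICT (by name: the statement is the Claim_ definition above) =====
theorem get_sub_seq_cnt_spec : Claim_equal_get_sub_seq_cnt := by
  intro line value length hDom hPre
  unfold Spec_get_sub_seq_cnt
  by_cases hlen : 0 ≤ length
  · obtain ⟨n, rfl⟩ : ∃ m : Nat, length = (m : Int) := ⟨length.toNat, (Int.toNat_of_nonneg hlen).symm⟩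
    simp only [get_sub_seq_cnt, get_sub_seq_cnt_alt]
    have hstep : (fun (s : Int × Int) i =>
        if PySem.List.pyGetD line i 0 ≥ value then (if s.1 > 0 then s.1 + 1 else 1, s.2)
        else (0, if s.1 > s.2 then s.1 else s.2))
        = pvStep (fun i => decide (value ≤ PySem.List.pyGetD line i 0)) := by
      funext s i; simp [pvStep, ge_iff_le]
    have hfilt : (fun i => decide (PySem.List.pyGetD line i 0 < value))
        = (fun i => !(fun j => decide (value ≤ PySem.List.pyGetD line j 0)) i) := by
      funext i
      by_cases hv : PySem.List.pyGetD line i 0 < value <;> simp [hv]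
      omega
    rw [hstep, hfilt, pvInv]
    set J := (PySem.List.pyRange 0 (n : Int) 1).filter
      (fun i => !(fun j => decide (value ≤ PySem.List.pyGetD line j 0)) i) with hJ
    have hmax : max ((n : Int)) 0 = (n : Int) := max_eq_left (by exact_mod_cast Int.natCast_nonneg n)
    rw [hmax]
    have hlast : pvLast J < (n : Int) := by
      apply pvLast_lt _ _ (by omega)
      intro x hx
      exact ((PySem.List.mem_pyRange_one).1 (List.mem_of_mem_filter hx)).2
    show _ = pvMax (((-1 :: (J ++ [(n:Int)])).zip (-1 :: (J ++ [(n:Int)])).tail).map (fun p => p.2 - p.1 - 1))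
    rw [pvGaps_eq_zip]
    have hg := pvGaps_append (-1) J (n : Int)
    rw [pvLast_neg_one_cons] at hg
    rw [List.cons_append] at hg
    rw [hg, pvMax_append_singleton _ _ (by omega)]
    rw [max_def]; dsimp only; split <;> split <;> omega
  · have h0 : PySem.List.pyRange 0 length 1 = [] := PySem.List.pyRange_one_eq_nil (by omega)
    have hmax : max length 0 = 0 := max_eq_right (by omega)
    simp [get_sub_seq_cnt, get_sub_seq_cnt_alt, h0, hmax, PySem.List.maxD, PySem.List.max?]
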